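-- pv_equiv track=rewrite | github.com/fanasno/savr-portfoliokollen-testsavr | app.py | get_fx_tickers
-- ===== SOURCE A (Python) =====
-- def get_currency_fx_ticker(currency: str) -> str | None:
--     currency = str(currency).upper()
--     if currency == "SEK":
--         return None
--     return f"{currency}SEK=X"
--
-- def get_fx_tickers(currencies: list[str]) -> tuple[str, ...]:
--     return tuple(
--         sorted(
--             {
--                 fx_ticker
--                 for currency in currencies
--                 if (fx_ticker := get_currency_fx_ticker(currency)) is not None
--             }
--         )
--     )
-- ===== SOURCE B (Python) =====
-- def get_fx_tickers(currencies):
--     tickers = sorted(c.upper() + "SEK=X" for c in currencies if c.upper() != "SEK")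
--     out = []
--     prev = None
--     for t in tickers:
--         if t != prev:
--             out.append(t)
--             prev = t
--     return tuple(out)
-- ===== Notes on version B (the rewrite author's own statement) =====
-- stated objective: alternative
-- what changed: B replaces A's hash-set dedup followed by sorting with mapping/filtering into a plain list (duplicates kept), sorting it, and a single linear scan that emits each element only when it differs from the previous one.
import Mathlib
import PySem

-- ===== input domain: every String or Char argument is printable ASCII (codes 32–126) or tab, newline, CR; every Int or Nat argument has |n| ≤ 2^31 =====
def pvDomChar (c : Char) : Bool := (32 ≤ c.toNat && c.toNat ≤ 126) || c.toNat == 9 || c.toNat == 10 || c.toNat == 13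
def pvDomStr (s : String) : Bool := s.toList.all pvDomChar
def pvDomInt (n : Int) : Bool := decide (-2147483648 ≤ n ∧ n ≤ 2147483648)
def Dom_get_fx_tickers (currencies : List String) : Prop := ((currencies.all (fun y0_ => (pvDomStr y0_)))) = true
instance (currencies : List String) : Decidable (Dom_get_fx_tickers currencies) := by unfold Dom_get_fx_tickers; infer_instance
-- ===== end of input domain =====

-- B maps/filters into a sorted list with duplicates and dedups by one adjacent-difference scan,
-- instead of A's hash-set dedup followed by sorting (objective: alternative decomposition).

-- ===== PORT A =====
-- 'f"{currency}SEK=X"' is ported as String.mk (toList ++ toList): exact Python string concatenation.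
def get_currency_fx_ticker (currency : String) : Option String :=
  let c := PySem.Str.upper currency
  if c = "SEK" then none
  else some (String.mk (c.toList ++ "SEK=X".toList))

def get_fx_tickers (currencies : List String) : List String :=
  let s : PySem.Set String := currencies.foldl
    (fun acc currency =>
      match get_currency_fx_ticker currency with
      | some fx_ticker => PySem.Set.add acc fx_ticker
      | none => acc) PySem.Set.empty
  PySem.List.sorted s (fun x => x) false

-- ===== PORT B =====
def get_fx_tickers_alt (currencies : List String) : List String :=
  let tickers := PySem.List.sorted
    ((currencies.filter (fun c => ¬ PySem.Str.upper c = "SEK")).map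
      (fun c => String.mk ((PySem.Str.upper c).toList ++ "SEK=X".toList)))
    (fun x => x) false
  let res := tickers.foldl
    (fun (st : List String × Option String) t =>
      if some t ≠ st.2 then (st.1 ++ [t], some t) else st)
    ([], none)
  res.1

-- ===== PRECONDITION & SPEC =====
def Spec_get_fx_tickers (currencies : List String) (out : List String) : Prop := out = get_fx_tickers_alt currencies
instance (currencies : List String) (out : List String) : Decidable (Spec_get_fx_tickers currencies out) := by unfold Spec_get_fx_tickers; infer_instance

-- ===== CLAIM (what is proved, stated in full; the proofs are below) =====
def Claim_equal_get_fx_tickers : Prop := ∀ (currencies : List String), Dom_get_fx_tickers currencies → Spec_get_fx_tickers currencies (get_fx_tickers currencies)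

-- ===== LEMMAS AND PROOFS =====

-- proof-side structural form of B's dedup loop
def pvDedupFrom (prev : Option String) : List String → List String
  | [] => []
  | t :: ts => if some t ≠ prev then t :: pvDedupFrom (some t) ts else pvDedupFrom prev ts

theorem pvDedupFrom_cons (prev : Option String) (t : String) (ts : List String) :
    pvDedupFrom prev (t :: ts)
    = if some t ≠ prev then t :: pvDedupFrom (some t) ts else pvDedupFrom prev ts := rfl

theorem pvFoldl_dedup (xs : List String) : ∀ (out : List String) (prev : Option String),
    (xs.foldl (fun (st : List String × Option String) t =>
      if some t ≠ st.2 then (st.1 ++ [t], some t) else st) (out, prev)).1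
    = out ++ pvDedupFrom prev xs := by
  induction xs with
  | nil => intro out prev; simp [pvDedupFrom]
  | cons t ts ih =>
    intro out prev
    rw [List.foldl_cons]
    by_cases h : some t = prev
    · have hstep : (if some t ≠ (out, prev).2 then ((out, prev).1 ++ [t], some t) else (out, prev))
          = (out, prev) := by simp [h]
      rw [hstep, ih, pvDedupFrom_cons, if_neg (by simp [h])]
    · have hstep : (if some t ≠ (out, prev).2 then ((out, prev).1 ++ [t], some t) else (out, prev))
          = (out ++ [t], some t) := by simp [h]
      rw [hstep, ih, pvDedupFrom_cons, if_pos h, List.append_assoc, List.singleton_append]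

theorem pvMem_dedupFrom {y : String} (xs : List String) : ∀ prev, y ∈ pvDedupFrom prev xs → y ∈ xs := by
  induction xs with
  | nil => intro prev h; simp [pvDedupFrom] at h
  | cons t ts ih =>
    intro prev h
    rw [pvDedupFrom_cons] at h
    by_cases he : some t = prev
    · rw [if_neg (by simp [he])] at h
      exact List.mem_cons_of_mem _ (ih _ h)
    · rw [if_pos he] at h
      rcases List.mem_cons.mp h with rfl | h
      · exact List.mem_cons_self
      · exact List.mem_cons_of_mem _ (ih _ h)

theorem pvMem_dedupFrom' {y : String} (xs : List String) :
    ∀ prev, y ∈ xs → y ∈ pvDedupFrom prev xs ∨ some y = prev := by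
  induction xs with
  | nil => intro prev h; simp at h
  | cons t ts ih =>
    intro prev h
    rw [pvDedupFrom_cons]
    by_cases he : some t = prev
    · rw [if_neg (by simp [he])]
      rcases List.mem_cons.mp h with rfl | h
      · right; exact he
      · exact ih prev h
    · rw [if_pos he]
      rcases List.mem_cons.mp h with rfl | h
      · left; exact List.mem_cons_self
      · rcases ih (some t) h with h' | h'
        · left; exact List.mem_cons_of_mem _ h'
        · left
          have : y = t := by simpa using h'
          simp [this]

theorem pvDedupFrom_pairwise (xs : List String) :
    ∀ prev, xs.Pairwise (· ≤ ·) → (∀ p, prev = some p → ∀ y ∈ xs, p ≤ y) →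
    (pvDedupFrom prev xs).Pairwise (· < ·) ∧
      (∀ p, prev = some p → ∀ y ∈ pvDedupFrom prev xs, p < y) := by
  induction xs with
  | nil => intro prev _ _; simp [pvDedupFrom]
  | cons t ts ih =>
    intro prev hp hprev
    have hts : ts.Pairwise (· ≤ ·) := (List.pairwise_cons.mp hp).2
    have hall : ∀ y ∈ ts, t ≤ y := (List.pairwise_cons.mp hp).1
    rw [pvDedupFrom_cons]
    by_cases he : some t = prev
    · have ihr := ih prev hts (by
        intro p hpp y hy
        have ht : t = p := by rw [hpp] at he; simpa using he
        exact ht ▸ hall y hy)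
      rw [if_neg (by simp [he])]
      exact ihr
    · have ihr := ih (some t) hts (by
        intro p hpp y hy
        cases hpp
        exact hall y hy)
      rw [if_pos he]
      constructor
      · refine List.pairwise_cons.mpr ⟨?_, ihr.1⟩
        intro y hy
        exact ihr.2 t rfl y hy
      · intro p hpp y hy
        have hpt : p ≤ t := hprev p hpp t List.mem_cons_self
        rcases List.mem_cons.mp hy with rfl | hy
        · have : p ≠ y := by
            intro hq; exact he (by simp [← hq, hpp])
          exact lt_of_le_of_ne hpt this
        · exact lt_of_le_of_lt hpt (ihr.2 t rfl y hy)

theorem pvFoldl_set_add (xs : List String) :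
    ∀ acc : PySem.Set String,
      xs.foldl (fun acc currency =>
        match get_currency_fx_ticker currency with
        | some fx_ticker => PySem.Set.add acc fx_ticker
        | none => acc) acc
      = (xs.filterMap get_currency_fx_ticker).foldl PySem.Set.add acc := by
  induction xs with
  | nil => intro acc; simp
  | cons c cs ih =>
    intro acc
    cases h : get_currency_fx_ticker c <;> simp [h, ih]

theorem pvFilterMap_eq (xs : List String) :
    xs.filterMap get_currency_fx_ticker
    = (xs.filter (fun c => ¬ PySem.Str.upper c = "SEK")).map
        (fun c => String.mk ((PySem.Str.upper c).toList ++ "SEK=X".toList)) := by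
  induction xs with
  | nil => rfl
  | cons c cs ih =>
    rw [List.filterMap_cons, List.filter_cons]
    by_cases h : PySem.Str.upper c = "SEK"
    · rw [show get_currency_fx_ticker c = none from by simp [get_currency_fx_ticker, h],
        if_neg (by simp [h])]
      exact ih
    · rw [show get_currency_fx_ticker c
          = some (String.mk ((PySem.Str.upper c).toList ++ "SEK=X".toList)) from by
            simp [get_currency_fx_ticker, h],
        if_pos (by simp [h]), List.map_cons, ih]

-- ===== VERDICT (by name: the statement is the Claim_ definition above) =====
theorem get_fx_tickers_spec : Claim_equal_get_fx_tickers := by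
  intro currencies _
  unfold Spec_get_fx_tickers get_fx_tickers get_fx_tickers_alt
  rw [pvFoldl_set_add, pvFilterMap_eq]
  set L := (currencies.filter (fun c => ¬ PySem.Str.upper c = "SEK")).map
      (fun c => String.mk ((PySem.Str.upper c).toList ++ "SEK=X".toList)) with hL
  rw [pvFoldl_dedup]
  have hsetL : (L.foldl PySem.Set.add PySem.Set.empty) = PySem.Set.ofList L :=
    (PySem.Set.ofList_eq_foldl L).symm
  rw [hsetL]
  simp only [List.nil_append]
  set S := PySem.List.sorted L (fun x => x) false with hS
  have hpS : S.Pairwise (· ≤ ·) := by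
    have := PySem.List.sorted_pairwise (xs := L) (key := fun x => x)
    simpa using this
  have hpd : (pvDedupFrom none S).Pairwise (· < ·) :=
    (pvDedupFrom_pairwise S none hpS (by intro p hp; cases hp)).1
  refine (PySem.List.sorted_eq_of_perm_of_pairwise_lt (PySem.Set.ofList L) (pvDedupFrom none S) (fun x : String => x) ?_ ?_)
  · refine (List.perm_ext_iff_of_nodup ?_ (PySem.Set.nodup_ofList L)).mpr ?_
    · exact hpd.imp (fun h => ne_of_lt h)
    · intro y
      constructor
      · intro hy
        have : y ∈ S := pvMem_dedupFrom S none hy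
        rw [PySem.Set.mem_ofList]
        exact (PySem.List.mem_sorted L (fun x => x) false y).mp this
      · intro hy
        have hyL : y ∈ L := (PySem.Set.mem_ofList L y).mp hy
        have hyS : y ∈ S := (PySem.List.mem_sorted L (fun x => x) false y).mpr hyL
        rcases pvMem_dedupFrom' S none hyS with h | h
        · exact h
        · cases h
  · simpa using hpd
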